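-- pv_equiv track=rewrite | github.com/918particle/ComputerLogicAndCircuitDesign | HomeworkSolutions/Fall2021/homework2/converter.py | convert_bcd_dec
-- ===== SOURCE A (Python) =====
-- def convert_bin_dec(x):
-- 	result = 0
-- 	str_num = [int(d) for d in str(x)]
-- 	str_num.reverse()
-- 	n = len(str_num)
-- 	for i in range(n):
-- 		result += 2**i * int(str_num[i])
-- 	return result
--
-- def convert_bcd_dec(x):
-- 	list_in = [int(d) for d in str(x)]
-- 	list_out = []
-- 	word_length = 4
-- 	n = len(list_in)
-- 	count = word_length
-- 	while(count<=n):
-- 		current = ''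
-- 		for x in list_in[count-word_length:count]:
-- 			current+=str(x)
-- 		list_out.append(convert_bin_dec(current))
-- 		count+=word_length
-- 	return list_out
-- ===== SOURCE B (Python) =====
-- def convert_bcd_dec(x):
--     digits = [int(d) for d in str(x)]
--     n = len(digits)
--     out = []
--     for i in range(0, n - n % 4, 4):
--         val = 0
--         for d in digits[i:i+4]:
--             val = val * 2 + d
--         out.append(val)
--     return out
-- ===== Notes on version B (the rewrite author's own statement) =====
-- stated objective: simpler
-- what changed: B drops the convert_bin_dec helper and its string round-trip entirely: instead of re-stringifying each 4-digit chunk, re-parsing it, reversing it and summing 2**i powers, B walks the digit list once with a for-loop over range(0, n - n%4, 4) and evaluates each chunk by a left-to-right Horner fold (val = val*2 + d).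
import Mathlib
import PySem

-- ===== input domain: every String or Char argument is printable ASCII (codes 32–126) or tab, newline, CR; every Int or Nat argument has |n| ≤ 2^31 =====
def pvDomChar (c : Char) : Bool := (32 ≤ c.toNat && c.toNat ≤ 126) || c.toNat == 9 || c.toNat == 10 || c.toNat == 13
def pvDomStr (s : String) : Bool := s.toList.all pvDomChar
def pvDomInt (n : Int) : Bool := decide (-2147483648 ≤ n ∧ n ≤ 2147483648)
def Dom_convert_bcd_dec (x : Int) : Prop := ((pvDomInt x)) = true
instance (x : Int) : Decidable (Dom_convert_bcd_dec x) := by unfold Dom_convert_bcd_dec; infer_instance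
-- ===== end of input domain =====

-- B replaces A's per-chunk stringify/re-parse/reverse/power-sum helper by one Horner fold per chunk (objective: simpler).

-- ===== PORT A =====
-- int(d) for a single character d; `.getD 0` is only reached where Python raises ValueError (excluded by Pre_)
def pvCharInt (c : Char) : Int := (PySem.Int.ofChars? [c]).getD 0

-- helper convert_bin_dec; its Python argument is the string `current` (str(x) of a string is itself)
def convert_bin_dec (x : List Char) : Int :=
  let str_num := (x.map pvCharInt).reverse
  let n : Int := (str_num.length : Int)
  (PySem.List.pyRange 0 n 1).foldl
    (fun result i => result + 2 ^ i.toNat * PySem.List.pyGetD str_num i 0) 0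

-- the while-loop of convert_bcd_dec, one recursive call per iteration
def bcdLoop (list_in : List Int) (n : Nat) (count : Nat) (list_out : List Int) : List Int :=
  if count ≤ n then
    -- current = ''.join building: ''.join is the for-loop `current += str(x)` over the 4-slice
    bcdLoop list_in n (count + 4) (list_out ++
      [convert_bin_dec ((PySem.List.slice list_in (some ((count : Int) - 4))
        (some (count : Int))).foldl (fun cur d => cur ++ PySem.Int.toChars d) [])])
  else list_out
termination_by n + 1 - count

def convert_bcd_dec (x : Int) : List Int :=
  let list_in := (PySem.Int.toChars x).map pvCharInt
  let n := list_in.length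
  bcdLoop list_in n 4 []

-- ===== PORT B =====
def convert_bcd_dec_alt (x : Int) : List Int :=
  let digits := (PySem.Int.toChars x).map pvCharInt
  let n : Int := (digits.length : Int)
  (PySem.List.pyRange 0 (n - PySem.Int.mod n 4) 4).foldl
    (fun out i =>
      out ++ [(PySem.List.slice digits (some i) (some (i + 4))).foldl (fun val d => val * 2 + d) 0]) []

-- ===== PRECONDITION & SPEC =====
-- Pre_ excludes exactly x < 0, where Python's int('-') raises ValueError (in A and in B alike).
def Pre_convert_bcd_dec (x : Int) : Prop := 0 ≤ x
instance (x : Int) : Decidable (Pre_convert_bcd_dec x) := by unfold Pre_convert_bcd_dec; infer_instance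
def pvWitness_convert_bcd_dec : Int := (10011000)
def Spec_convert_bcd_dec (x : Int) (out : List Int) : Prop := out = convert_bcd_dec_alt x
instance (x : Int) (out : List Int) : Decidable (Spec_convert_bcd_dec x out) := by unfold Spec_convert_bcd_dec; infer_instance

-- ===== CLAIM (what is proved, stated in full; the proofs are below) =====
def Claim_equal_convert_bcd_dec : Prop := ∀ (x : Int), Dom_convert_bcd_dec x → Pre_convert_bcd_dec x → Spec_convert_bcd_dec x (convert_bcd_dec x)

-- ===== LEMMAS AND PROOFS =====

-- every character produced by Nat.toDigitsCore is a digit character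
theorem pv_toDigitsCore_mem (fuel n : Nat) (ds : List Char)
    (hds : ∀ c ∈ ds, ∃ k, k < 10 ∧ c = Nat.digitChar k) :
    ∀ c ∈ Nat.toDigitsCore 10 fuel n ds, ∃ k, k < 10 ∧ c = Nat.digitChar k := by
  induction fuel generalizing n ds with
  | zero => simpa [Nat.toDigitsCore] using hds
  | succ fuel ih =>
    intro c hc
    simp only [Nat.toDigitsCore] at hc
    split at hc
    · rcases List.mem_cons.mp hc with h | h
      · exact ⟨n % 10, Nat.mod_lt _ (by omega), h⟩
      · exact hds c h
    · refine ih _ _ ?_ c hc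
      intro c' hc'
      rcases List.mem_cons.mp hc' with h | h
      · exact ⟨n % 10, Nat.mod_lt _ (by omega), h⟩
      · exact hds c' h

theorem pv_toChars_digit_chars (x : Int) (hx : 0 ≤ x) :
    ∀ c ∈ PySem.Int.toChars x, ∃ k, k < 10 ∧ c = Nat.digitChar k := by
  intro c hc
  rw [PySem.Int.toChars, if_neg (by omega)] at hc
  exact pv_toDigitsCore_mem _ _ [] (by simp) c hc

theorem pvCharInt_digitChar (k : Nat) (hk : k < 10) :
    pvCharInt (Nat.digitChar k) = (k : Int) := by
  interval_cases k <;> decide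

theorem pv_digits_bounded (x : Int) (hx : 0 ≤ x) :
    ∀ d ∈ (PySem.Int.toChars x).map pvCharInt, 0 ≤ d ∧ d ≤ 9 := by
  intro d hd
  rcases List.mem_map.mp hd with ⟨c, hc, rfl⟩
  rcases pv_toChars_digit_chars x hx c hc with ⟨k, hk, rfl⟩
  rw [pvCharInt_digitChar k hk]
  omega

theorem pv_toChars_single (d : Int) (h0 : 0 ≤ d) (h9 : d ≤ 9) :
    PySem.Int.toChars d = [Nat.digitChar d.toNat] := by
  interval_cases d <;> decide

-- str()-then-int() round-trip on a list of single digits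
theorem pv_roundtrip (c : List Int) (hb : ∀ d ∈ c, 0 ≤ d ∧ d ≤ 9) :
    (c.flatMap PySem.Int.toChars).map pvCharInt = c := by
  induction c with
  | nil => simp
  | cons a c ih =>
    have ha := hb a (by simp)
    have h1 : PySem.Int.toChars a = [Nat.digitChar a.toNat] := pv_toChars_single a ha.1 ha.2
    simp only [List.flatMap_cons, List.map_append, h1, List.map_cons, List.map_nil,
      ih (fun d hd => hb d (by simp [hd]))]
    have h2 : pvCharInt (Nat.digitChar a.toNat) = (a.toNat : Int) :=
      pvCharInt_digitChar a.toNat (by omega)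
    simp [h2, Int.toNat_of_nonneg ha.1]

-- Horner fold with a non-zero initial accumulator
theorem pv_horner_shift (L : List Int) (v : Int) :
    L.foldl (fun a d => a * 2 + d) v = v * 2 ^ L.length + L.foldl (fun a d => a * 2 + d) 0 := by
  induction L generalizing v with
  | nil => simp
  | cons a L ih =>
    simp only [List.foldl_cons, List.length_cons]
    rw [ih (v * 2 + a), ih (0 * 2 + a)]
    ring

-- A\'s reversed power sum equals the Horner fold on the un-reversed list
theorem pv_powsum (L : List Int) :
    (List.range L.length).foldl (fun r k => r + 2 ^ k * L.getD k 0) 0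
      = L.reverse.foldl (fun a d => a * 2 + d) 0 := by
  induction L using List.reverseRecOn with
  | nil => simp
  | append_singleton M a ih =>
    have hcong : (List.range M.length).foldl (fun r k => r + 2 ^ k * (M ++ [a]).getD k 0) 0
        = (List.range M.length).foldl (fun r k => r + 2 ^ k * M.getD k 0) 0 := by
      refine PySem.List.foldl_congr_mem _ _ _ _ ?_
      intro acc k hk
      rw [List.getD_append _ _ _ _ (List.mem_range.mp hk)]
    have hgd : (M ++ [a]).getD M.length 0 = a := by simp
    simp only [List.length_append, List.length_cons, List.length_nil, List.range_succ,
      List.foldl_append, List.foldl_cons, List.foldl_nil, hcong, ih, hgd,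
      List.reverse_append, List.reverse_cons, List.reverse_nil, List.nil_append]
    rw [pv_horner_shift M.reverse (0 * 2 + a)]
    simp only [List.length_reverse]
    ring

-- the value A computes for one chunk equals B\'s Horner value of that chunk
theorem pv_chunk_val (c : List Int) (hb : ∀ d ∈ c, 0 ≤ d ∧ d ≤ 9) :
    convert_bin_dec (c.foldl (fun cur d => cur ++ PySem.Int.toChars d) [])
      = c.foldl (fun val d => val * 2 + d) 0 := by
  rw [PySem.List.foldl_append_eq_flatMap, List.nil_append]
  simp only [convert_bin_dec, pv_roundtrip c hb]
  rw [PySem.List.pyRange_zero_nat]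
  simp only [List.foldl_map, Int.toNat_natCast, PySem.List.pyGetD_natCast]
  have h := pv_powsum c.reverse
  simp only [List.reverse_reverse] at h
  rw [h]

-- B\'s Horner value of the chunk starting at index i
def pvChunk (D : List Int) (i : Int) : Int :=
  (PySem.List.slice D (some i) (some (i + 4))).foldl (fun val d => val * 2 + d) 0

theorem pv_loop_eq (m : Nat) (D : List Int) (j : Nat) (out : List Int)
    (hb : ∀ d ∈ D, 0 ≤ d ∧ d ≤ 9) (hm : D.length ≤ 4 * j + m) :
    bcdLoop D D.length (4 * j + 4) out
      = out ++ (List.range (D.length / 4 - j)).map (fun k => pvChunk D ((4 * (j + k) : Nat) : Int)) := by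
  induction m generalizing j out with
  | zero =>
    rw [bcdLoop, if_neg (by omega)]
    have h0 : D.length / 4 - j = 0 := by omega
    simp [h0]
  | succ m ih =>
    by_cases h : 4 * j + 4 ≤ D.length
    · rw [bcdLoop, if_pos h]
      have hb1 : ((4 * j + 4 : Nat) : Int) - 4 = ((4 * j : Nat) : Int) := by push_cast; ring
      have hb2 : ((4 * j + 4 : Nat) : Int) = ((4 * j : Nat) : Int) + 4 := by push_cast; ring
      rw [hb1, hb2]
      have hbs : ∀ d ∈ PySem.List.slice D (some ((4 * j : Nat) : Int))
          (some (((4 * j : Nat) : Int) + 4)), 0 ≤ d ∧ d ≤ 9 :=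
        fun d hd => hb d (PySem.List.mem_of_mem_slice D _ _ hd)
      rw [pv_chunk_val _ hbs]
      have h48 : 4 * j + 4 + 4 = 4 * (j + 1) + 4 := by ring
      rw [h48, ih (j + 1) _ (by omega)]
      have hq : D.length / 4 - j = (D.length / 4 - (j + 1)) + 1 := by omega
      rw [hq, List.range_succ_eq_map, List.map_cons, List.map_map]
      have hmc : (List.range (D.length / 4 - (j + 1))).map
            ((fun k => pvChunk D ((4 * (j + k) : Nat) : Int)) ∘ Nat.succ)
          = (List.range (D.length / 4 - (j + 1))).map
            (fun k => pvChunk D ((4 * (j + 1 + k) : Nat) : Int)) := by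
        refine List.map_congr_left ?_
        intro k _
        simp only [Function.comp]
        congr 2
        omega
      rw [hmc]
      simp [pvChunk]
    · rw [bcdLoop, if_neg (by omega)]
      have h0 : D.length / 4 - j = 0 := by omega
      simp [h0]

-- ===== VERDICT (by name: the statement is the Claim_ definition above) =====
theorem convert_bcd_dec_spec : Claim_equal_convert_bcd_dec := by
  intro x hdom hpre
  show convert_bcd_dec x = convert_bcd_dec_alt x
  simp only [convert_bcd_dec, convert_bcd_dec_alt]
  have hb := pv_digits_bounded x hpre
  set D := (PySem.Int.toChars x).map pvCharInt with hD
  -- A side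
  have hA := pv_loop_eq D.length D 0 [] hb (by omega)
  norm_num at hA
  rw [hA]
  -- B side
  rw [PySem.List.foldl_append_singleton_eq_map, List.nil_append]
  have hmod : ((D.length : Int)) - PySem.Int.mod (D.length : Int) 4
      = ((D.length - D.length % 4 : Nat) : Int) := by
    rw [show (4 : Int) = ((4 : Nat) : Int) by norm_num, PySem.Int.mod_natCast]
    have := Nat.mod_le D.length 4
    push_cast
    omega
  rw [hmod, PySem.List.pyRange_of_pos _ _ (by norm_num), List.map_map]
  have hN : (if (0 : Int) < ((D.length - D.length % 4 : Nat) : Int)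
      then ((((D.length - D.length % 4 : Nat) : Int) - 0 + 4 - 1) / 4).toNat else 0)
      = D.length / 4 := by
    split_ifs with hpos
    · omega
    · omega
  rw [hN]
  refine List.map_congr_left ?_
  intro k _
  simp only [Function.comp, pvChunk]
  norm_num
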